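-- pv_equiv track=rewrite | github.com/czvr6nbsz2-dev/projectenlogs | verwerk.py | _split_subsections
-- ===== SOURCE A (Python) =====
-- def _split_subsections(text: str, names: list[str]) -> dict[str, list[str]]:
--     """Split text into named subsections, returning {name: [bullet lines]}."""
--     result: dict[str, list[str]] = {}
--     current = None
--     for line in text.split("\n"):
--         stripped = line.strip()
--         if stripped in names:
--             current = stripped
--             result[current] = []
--         elif current and stripped.startswith("- "):
--             result[current].append(line)
--     return result
-- ===== SOURCE B (Python) =====
-- def _split_subsections(text: str, names: list[str]) -> dict[str, list[str]]:
--     """Split text into named subsections, returning {name: [bullet lines]}."""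
--     result: dict[str, list[str]] = {}
--     rest = text.split("\n")
--     while rest:
--         s = rest[0].strip()
--         rest = rest[1:]
--         if s in names:
--             seg = []
--             while rest and rest[0].strip() not in names:
--                 seg.append(rest[0])
--                 rest = rest[1:]
--             result[s] = [l for l in seg if l.strip().startswith("- ")]
--     return result
-- ===== Notes on version B (the rewrite author's own statement) =====
-- stated objective: simpler
-- what changed: A is a single stateful pass carrying a `current` header and incrementally appending bullets into the dict; B has no carried state: it scans to each header, consumes that header's whole block with an inner scan, filters it to bullet lines and inserts the completed section at once.
-- outside the precondition, e.g. on _split_subsections('\n- x', ['']): A returns {'': []}, B returns {'': ['- x']}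
import Mathlib
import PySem

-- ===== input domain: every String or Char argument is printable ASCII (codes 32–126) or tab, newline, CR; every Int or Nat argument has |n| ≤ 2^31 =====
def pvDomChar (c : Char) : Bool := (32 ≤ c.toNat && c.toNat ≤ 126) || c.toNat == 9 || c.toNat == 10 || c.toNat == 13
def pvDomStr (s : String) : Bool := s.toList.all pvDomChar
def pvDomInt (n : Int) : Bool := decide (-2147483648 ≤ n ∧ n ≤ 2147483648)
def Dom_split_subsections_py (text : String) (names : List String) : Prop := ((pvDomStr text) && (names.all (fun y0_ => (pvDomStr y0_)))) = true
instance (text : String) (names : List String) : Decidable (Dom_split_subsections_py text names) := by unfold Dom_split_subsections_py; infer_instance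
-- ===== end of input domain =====

-- B replaces A's single stateful pass (a `current` header with incremental dict appends) by a
-- stateless segment scan that inserts each completed section at once; same return value on Pre_.

-- ===== PORT A =====
-- the loop of A: state = (result dict, current); `current and …` is Python truthiness, i.e. current set and non-empty
def pvAGo (names : List String) : List String → PySem.Dict String (List String) → Option String → PySem.Dict String (List String)
  | [], result, _ => result
  | line :: rest, result, current =>
    let stripped := PySem.Str.strip line
    if names.contains stripped then
      pvAGo names rest (result.insert stripped []) (some stripped)
    else
      match current with
      | some c =>
        if c ≠ "" ∧ PySem.Str.startswith stripped "- " then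
          pvAGo names rest (result.modify c [] (fun v => v ++ [line])) (some c)
        else
          pvAGo names rest result (some c)
      | none => pvAGo names rest result none

def split_subsections_py (text : String) (names : List String) : List (String × List String) :=
  (pvAGo names ((PySem.Str.split? text "\n").getD []) PySem.Dict.empty none).items

-- ===== PORT B =====
def pvNotHeader (names : List String) (x : String) : Bool := !(names.contains (PySem.Str.strip x))

def pvBullets (seg : List String) : List String :=
  seg.filter (fun l => PySem.Str.startswith (PySem.Str.strip l) "- ")

-- the outer while of B: each header consumes its whole block (the inner while = takeWhile/dropWhile)
def pvBGo (names : List String) : List String → PySem.Dict String (List String) → PySem.Dict String (List String)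
  | [], result => result
  | line :: rest, result =>
    let s := PySem.Str.strip line
    if names.contains s then
      pvBGo names (rest.dropWhile (pvNotHeader names))
        (result.insert s (pvBullets (rest.takeWhile (pvNotHeader names))))
    else
      pvBGo names rest result
termination_by ls _ => ls.length
decreasing_by
  · have := List.length_dropWhile_le (pvNotHeader names) rest
    simp; omega
  · simp

def split_subsections_py_alt (text : String) (names : List String) : List (String × List String) :=
  (pvBGo names ((PySem.Str.split? text "\n").getD []) PySem.Dict.empty).items

-- ===== PRECONDITION & SPEC =====
-- Pre_ excludes an empty string among the section names: a blank line then acts as a section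
-- header whose bullets A drops (Python truthiness of `current`) while B keeps them — a
-- degenerate corner no caller of a section splitter specifies either way.
def Pre_split_subsections_py (text : String) (names : List String) : Prop := "" ∉ names
instance (text : String) (names : List String) : Decidable (Pre_split_subsections_py text names) := by unfold Pre_split_subsections_py; infer_instance

def pvWitness_split_subsections_py : String × List String :=
  ("Fruit\n- apple\nskip\nVeg\n- beet", ["Fruit", "Veg"])

def Spec_split_subsections_py (text : String) (names : List String) (out : List (String × List String)) : Prop := out = split_subsections_py_alt text names
instance (text : String) (names : List String) (out : List (String × List String)) : Decidable (Spec_split_subsections_py text names out) := by unfold Spec_split_subsections_py; infer_instance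

-- ===== CLAIM (what is proved, stated in full; the proofs are below) =====
def Claim_equal_split_subsections_py : Prop := ∀ (text : String) (names : List String), Dom_split_subsections_py text names → Pre_split_subsections_py text names → Spec_split_subsections_py text names (split_subsections_py text names)

-- ===== LEMMAS AND PROOFS =====

-- inserting twice at the same key is inserting the last value
theorem pv_insert_insert {κ ν : Type} [BEq κ] [LawfulBEq κ] (d : PySem.Dict κ ν) (c : κ) (v w : ν) :
    (d.insert c v).insert c w = d.insert c w := by
  apply PySem.Dict.ext
  have h1 : (d.insert c v).contains c = true := PySem.Dict.contains_insert_self d c v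
  rw [PySem.Dict.items_insert_of_contains _ w h1]
  by_cases h : d.contains c = true
  · rw [PySem.Dict.items_insert_of_contains _ v h, PySem.Dict.items_insert_of_contains _ w h,
      List.map_map]
    apply List.map_congr_left
    intro p _
    by_cases hp : (p.1 == c) = true <;> simp [hp]
  · have h' : d.contains c = false := by simpa using h
    rw [PySem.Dict.items_insert_of_not_contains _ v h',
      PySem.Dict.items_insert_of_not_contains _ w h', List.map_append]
    have hall : ∀ p ∈ d.items, (p.1 == c) = false := by
      simpa [PySem.Dict.contains, List.any_eq_false] using h'
    have : d.items.map (fun p => if (p.1 == c) = true then (c, w) else p) = d.items := by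
      rw [List.map_congr_left (g := id) (by intro p hp; simp [hall p hp]), List.map_id]
    simp [this]

-- `result[c] = []` followed by appends is one insert of the accumulated list
theorem pv_modify_insert {κ ν : Type} [BEq κ] [LawfulBEq κ] (d : PySem.Dict κ ν) (c : κ) (v d0 : ν) (f : ν → ν) :
    (d.insert c v).modify c d0 f = d.insert c (f v) := by
  rw [PySem.Dict.modify, PySem.Dict.getD_insert_self, pv_insert_insert]

-- main invariant: once A has opened section c (entry = acc), the rest of A's pass equals B's
-- block-at-a-time pass on the remaining lines
theorem pvL1 (names : List String) (h0 : "" ∉ names) :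
    ∀ (ls : List String) (d : PySem.Dict String (List String)) (c : String) (acc : List String), c ≠ "" →
      pvAGo names ls (d.insert c acc) (some c)
        = pvBGo names (ls.dropWhile (pvNotHeader names))
            (d.insert c (acc ++ pvBullets (ls.takeWhile (pvNotHeader names)))) := by
  intro ls
  induction ls with
  | nil => intro d c acc hc; simp [pvAGo, pvBGo, pvBullets]
  | cons l ls ih =>
    intro d c acc hc
    by_cases hh : names.contains (PySem.Str.strip l) = true
    · have hmem : PySem.Str.strip l ∈ names := by simpa using hh
      have hs : PySem.Str.strip l ≠ "" := fun e => h0 (e ▸ hmem)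
      have hnh : pvNotHeader names l = false := by simp [pvNotHeader, hmem]
      rw [List.dropWhile_cons_of_neg (by simp [hnh]), List.takeWhile_cons_of_neg (by simp [hnh])]
      simp only [pvAGo, hh, if_true, pvBullets, List.filter_nil, List.append_nil]
      rw [ih (d.insert c acc) (PySem.Str.strip l) [] hs]
      conv_rhs => rw [pvBGo]
      simp [hmem]
    · have hnm : PySem.Str.strip l ∉ names := by simpa using hh
      have hnh : pvNotHeader names l = true := by simp [pvNotHeader, hnm]
      rw [List.dropWhile_cons_of_pos (by simp [hnh]), List.takeWhile_cons_of_pos (by simp [hnh])]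
      by_cases hb : PySem.Str.startswith (PySem.Str.strip l) "- " = true
      · simp only [pvAGo, hh]
        rw [if_neg (by simp [hnm]), if_pos ⟨hc, hb⟩, pv_modify_insert,
          ih (d) c (acc ++ [l]) hc]
        have hb' : PySem.Chars.startswith (PySem.Chars.strip l.toList) ['-', ' '] = true := by
          have := hb
          simp only [PySem.Str.startswith_eq, PySem.Str.toList_strip] at this
          simpa using this
        have : pvBullets (l :: ls.takeWhile (pvNotHeader names))
            = l :: pvBullets (ls.takeWhile (pvNotHeader names)) := by
          simp [pvBullets, hb']
        rw [this]
        simp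
      · simp only [pvAGo, hh]
        rw [if_neg (by simp [hnm]), if_neg (fun h => hb h.2), ih d c acc hc]
        have hb' : ¬ PySem.Chars.startswith (PySem.Chars.strip l.toList) ['-', ' '] = true := by
          have := hb
          simp only [PySem.Str.startswith_eq, PySem.Str.toList_strip] at this
          simpa using this
        have : pvBullets (l :: ls.takeWhile (pvNotHeader names))
            = pvBullets (ls.takeWhile (pvNotHeader names)) := by
          simp [pvBullets, hb']
        rw [this]

theorem pvL0 (names : List String) (h0 : "" ∉ names) :
    ∀ (ls : List String) (d : PySem.Dict String (List String)),
      pvAGo names ls d none = pvBGo names ls d := by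
  intro ls
  induction ls with
  | nil => intro d; simp [pvAGo, pvBGo]
  | cons l ls ih =>
    intro d
    by_cases hh : names.contains (PySem.Str.strip l) = true
    · have hmem : PySem.Str.strip l ∈ names := by simpa using hh
      have hs : PySem.Str.strip l ≠ "" := fun e => h0 (e ▸ hmem)
      simp only [pvAGo, hh, if_true]
      rw [pvL1 names h0 ls d (PySem.Str.strip l) [] hs]
      conv_rhs => rw [pvBGo]
      simp [hmem]
    · have hnm : PySem.Str.strip l ∉ names := by simpa using hh
      simp only [pvAGo, hh]
      rw [if_neg (by simp [hnm]), ih d]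
      conv_rhs => rw [pvBGo]
      simp [hnm]

-- ===== VERDICT (by name: the statement is the Claim_ definition above) =====
theorem split_subsections_py_spec : Claim_equal_split_subsections_py := by
  intro text names _ hpre
  unfold Spec_split_subsections_py split_subsections_py split_subsections_py_alt
  rw [pvL0 names hpre]
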